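-- pv_equiv track=rewrite | github.com/gnjardim/prog1_puc-rio | Aulas/code/P2/aula_repeticao_string.py | eh_reversa
-- ===== SOURCE A (Python) =====
-- def eh_reversa(s1, s2):
--     if len(s1) != len(s2):
--         return False
--
--     ini = 0
--     fim = -1
--
--     while ini < len(s1):
--         if s1[ini] != s2[fim]:
--             return False
--
--         ini += 1
--         fim -= 1
--
--     return True
-- ===== SOURCE B (Python) =====
-- def eh_reversa(s1, s2):
--     return s1 == s2[::-1]
-- ===== Notes on version B (the rewrite author's own statement) =====
-- stated objective: idiomatic
-- what changed: Replaces the explicit length guard and two-pointer index walk with the reverse-slice idiom s1 == s2[::-1]: one bulk reverse and one bulk equality comparison (C-level bulk ops instead of a per-character interpreted loop).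
import Mathlib
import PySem

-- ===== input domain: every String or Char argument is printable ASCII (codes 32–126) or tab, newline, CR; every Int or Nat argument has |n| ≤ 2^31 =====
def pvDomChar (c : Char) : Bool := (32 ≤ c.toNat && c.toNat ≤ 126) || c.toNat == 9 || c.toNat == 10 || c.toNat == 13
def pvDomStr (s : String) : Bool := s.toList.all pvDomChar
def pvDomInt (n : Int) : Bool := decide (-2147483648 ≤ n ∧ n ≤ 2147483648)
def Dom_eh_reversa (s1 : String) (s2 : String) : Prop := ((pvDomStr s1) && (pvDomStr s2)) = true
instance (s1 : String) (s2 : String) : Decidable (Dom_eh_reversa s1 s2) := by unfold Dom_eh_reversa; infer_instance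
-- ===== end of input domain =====

-- B replaces A's explicit two-pointer index walk by the idiomatic reverse-slice comparison s1 == s2[::-1].


-- ===== PORT A =====
-- the while loop: ini walks forward, fim walks backward as a Python negative index
def ehReversaLoop (l1 l2 : List Char) (ini : Nat) (fim : Int) : Bool :=
  if ini < l1.length then
    match PySem.List.pyGet? l1 (ini : Int), PySem.List.pyGet? l2 fim with
    | some a, some b => if a ≠ b then false else ehReversaLoop l1 l2 (ini + 1) (fim - 1)
    | _, _ => false   -- IndexError: unreachable here, the loop keeps fim in range when lengths are equal
  else true
termination_by l1.length - ini

def eh_reversa (s1 : String) (s2 : String) : Bool :=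
  if PySem.Str.len s1 ≠ PySem.Str.len s2 then false
  else ehReversaLoop s1.toList s2.toList 0 (-1)

-- ===== PORT B =====
def eh_reversa_alt (s1 : String) (s2 : String) : Bool :=
  match PySem.Str.slice? s2 none none (-1) with
  | some r => s1.toList == r.toList
  | none => false

-- ===== PRECONDITION & SPEC =====
def Spec_eh_reversa (s1 : String) (s2 : String) (out : Bool) : Prop := out = eh_reversa_alt s1 s2
instance (s1 : String) (s2 : String) (out : Bool) : Decidable (Spec_eh_reversa s1 s2 out) := by unfold Spec_eh_reversa; infer_instance

-- ===== CLAIM (what is proved, stated in full; the proofs are below) =====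
def Claim_equal_eh_reversa : Prop := ∀ (s1 : String) (s2 : String), Dom_eh_reversa s1 s2 → Spec_eh_reversa s1 s2 (eh_reversa s1 s2)

-- ===== LEMMAS AND PROOFS =====

-- loop invariant: with equal lengths, from position ini with fim = -(ini+1) the loop decides
-- "the suffixes of l1 and l2.reverse from ini agree"
theorem ehReversaLoop_inv (l1 l2 : List Char) (hlen : l1.length = l2.length) :
    ∀ ini : Nat, ini ≤ l1.length →
      ehReversaLoop l1 l2 ini (-(ini : Int) - 1) = decide (l1.drop ini = l2.reverse.drop ini) := by
  intro ini hini
  induction h : l1.length - ini generalizing ini with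
  | zero =>
      have he : ini = l1.length := by omega
      rw [ehReversaLoop, if_neg (by omega)]
      rw [List.drop_eq_nil_of_le (by omega),
          List.drop_eq_nil_of_le (by rw [List.length_reverse]; omega)]
      simp
  | succ k ih =>
      have hlt : ini < l1.length := by omega
      rw [ehReversaLoop]
      have h1 : PySem.List.pyGet? l1 (ini : Int) = some l1[ini] := by
        simp [PySem.List.pyGet?, PySem.List.pyIdx?, hlt]
      have hidx : (l2.length : Int) + (-(ini : Int) - 1) = ((l2.length - 1 - ini : Nat) : Int) := by
        omega
      have hlt2 : l2.length - 1 - ini < l2.length := by omega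
      have h2 : PySem.List.pyGet? l2 (-(ini : Int) - 1) = some l2[l2.length - 1 - ini] := by
        simp only [PySem.List.pyGet?, PySem.List.pyIdx?]
        have hneg : ¬ (0 : Int) ≤ -(ini : Int) - 1 := by omega
        rw [if_neg hneg, if_pos (by omega)]
        have ht : l2.length - (-(-(ini : Int) - 1)).toNat = l2.length - 1 - ini := by omega
        rw [ht]
        simp [hlt2]
      have hrev : l2.reverse[ini]'(by simpa [← hlen] using hlt) = l2[l2.length - 1 - ini] := by
        rw [List.getElem_reverse]
      have hd1 : l1.drop ini = l1[ini] :: l1.drop (ini + 1) := List.drop_eq_getElem_cons hlt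
      have hd2 : l2.reverse.drop ini = l2.reverse[ini]'(by simpa [← hlen] using hlt) ::
          l2.reverse.drop (ini + 1) := List.drop_eq_getElem_cons (by simpa [← hlen] using hlt)
      rw [if_pos hlt, h1, h2]
      have hred : (match some l1[ini], some (l2[l2.length - 1 - ini]'hlt2) with
          | some a, some b => if a ≠ b then false else ehReversaLoop l1 l2 (ini + 1) (-(ini : Int) - 1 - 1)
          | _, _ => false)
          = if l1[ini] ≠ l2[l2.length - 1 - ini]'hlt2 then false
            else ehReversaLoop l1 l2 (ini + 1) (-(ini : Int) - 1 - 1) := rfl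
      rw [hred]
      by_cases hc : l1[ini] = l2[l2.length - 1 - ini]
      · have harg : -((ini : Nat) + 1 : Nat) - 1 = -(ini : Int) - 1 - 1 := by push_cast; ring
        rw [if_neg (by simp [hc]), ← harg, ih (ini + 1) (by omega) (by omega)]
        rw [hd1, hd2, hrev, hc]
        exact decide_eq_decide.mpr (by simp)
      · rw [if_pos (by simp [hc])]
        symm
        rw [decide_eq_false_iff_not, hd1, hd2, hrev]
        intro hEq
        exact hc (List.cons_eq_cons.mp hEq).1

theorem eh_reversa_eq (s1 s2 : String) : eh_reversa s1 s2 = eh_reversa_alt s1 s2 := by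
  unfold eh_reversa eh_reversa_alt
  rw [PySem.Str.slice?_none_none_neg_one]
  simp only [PySem.Str.len_eq]
  by_cases hlen : s1.toList.length = s2.toList.length
  · rw [if_neg (by simp [hlen])]
    rw [show (-1 : Int) = -((0 : Nat) : Int) - 1 by norm_num,
        ehReversaLoop_inv s1.toList s2.toList hlen 0 (Nat.zero_le _)]
    simp [String.toList_ofList, Bool.beq_eq_decide_eq]
  · rw [if_pos (by exact_mod_cast hlen)]
    have : s1.toList ≠ s2.toList.reverse := by
      intro h
      apply hlen
      rw [h, List.length_reverse]
    simp [String.toList_ofList, this]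

-- ===== VERDICT (by name: the statement is the Claim_ definition above) =====
theorem eh_reversa_spec : Claim_equal_eh_reversa := by
  intro s1 s2 _
  exact eh_reversa_eq s1 s2
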